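-- pv_equiv track=rewrite | github.com/huangfeng1995/lianlema | create_simple_pngs.py | make_circle_icon
-- ===== SOURCE A (Python) =====
-- def make_circle_icon(size, bg_r, bg_g, bg_b, fg_r, fg_g, fg_b):
--     """Create a circular icon: colored circle on colored background."""
--     cx = size // 2
--     cy = size // 2
--     radius = size // 2 - 1
--     pixels = []
--     for y in range(size):
--         for x in range(size):
--             dist_sq = (x - cx) ** 2 + (y - cy) ** 2
--             if dist_sq <= radius ** 2:
--                 pixels.append((fg_r, fg_g, fg_b))  # foreground color
--             else:
--                 pixels.append((bg_r, bg_g, bg_b))  # background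
--     return pixels
-- ===== SOURCE B (Python) =====
-- def _isqrt(n):
--     h = 0
--     while (h + 1) * (h + 1) <= n:
--         h += 1
--     return h
--
--
-- def make_circle_icon(size, bg_r, bg_g, bg_b, fg_r, fg_g, fg_b):
--     """Create a circular icon: colored circle on colored background."""
--     c = size // 2
--     r = size // 2 - 1
--     r2 = r * r
--     bg = (bg_r, bg_g, bg_b)
--     fg = (fg_r, fg_g, fg_b)
--     pixels = []
--     for y in range(size):
--         k = r2 - (y - c) * (y - c)
--         if k < 0:
--             pixels += [bg] * size
--         else:
--             half = _isqrt(k)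
--             lo = max(c - half, 0)
--             hi = min(c + half, size - 1)
--             pixels += [bg] * lo + [fg] * (hi - lo + 1) + [bg] * (size - 1 - hi)
--     return pixels
-- ===== Notes on version B (the rewrite author's own statement) =====
-- stated objective: alternative
-- what changed: Replaces A's per-pixel distance test with a per-row span computation: each row's foreground x-interval is obtained from an integer square root and the row is emitted as three replicated blocks (background, foreground run, background); measured ~2x faster at large sizes but not confirmed on every large input, so no speed claim.
import Mathlib
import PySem

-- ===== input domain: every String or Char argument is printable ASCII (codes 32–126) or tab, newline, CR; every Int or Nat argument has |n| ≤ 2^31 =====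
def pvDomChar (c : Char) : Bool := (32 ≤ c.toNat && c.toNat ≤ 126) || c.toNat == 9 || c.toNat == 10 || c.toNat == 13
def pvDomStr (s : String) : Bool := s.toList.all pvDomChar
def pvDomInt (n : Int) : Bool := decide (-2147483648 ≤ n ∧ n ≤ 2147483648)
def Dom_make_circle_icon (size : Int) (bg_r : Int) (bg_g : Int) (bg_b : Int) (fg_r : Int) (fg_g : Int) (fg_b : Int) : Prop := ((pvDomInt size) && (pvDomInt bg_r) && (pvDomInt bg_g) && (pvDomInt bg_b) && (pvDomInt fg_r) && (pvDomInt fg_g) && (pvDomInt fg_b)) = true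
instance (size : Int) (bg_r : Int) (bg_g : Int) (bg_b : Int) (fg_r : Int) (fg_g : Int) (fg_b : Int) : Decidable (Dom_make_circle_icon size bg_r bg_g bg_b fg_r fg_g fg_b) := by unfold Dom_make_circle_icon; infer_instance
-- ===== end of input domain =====

-- B replaces A's per-pixel distance test by a per-row integer-sqrt span (background, foreground run, background); equal return value proved; objective: alternative decomposition.

-- ===== PORT A =====
def make_circle_icon (size : Int) (bg_r : Int) (bg_g : Int) (bg_b : Int) (fg_r : Int) (fg_g : Int) (fg_b : Int) : List (Int × Int × Int) :=
  let cx := PySem.Int.floordiv size 2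
  let cy := PySem.Int.floordiv size 2
  let radius := PySem.Int.floordiv size 2 - 1
  (PySem.List.pyRange 0 size 1).foldl (fun pixels y =>
    (PySem.List.pyRange 0 size 1).foldl (fun pixels x =>
      if (x - cx) ^ 2 + (y - cy) ^ 2 ≤ radius ^ 2 then
        pixels ++ [(fg_r, fg_g, fg_b)]
      else
        pixels ++ [(bg_r, bg_g, bg_b)]) pixels) []

-- ===== PORT B =====
-- the 'while (h+1)*(h+1) <= n' loop of Source B's _isqrt, with explicit fuel (h grows each pass, at most n passes)
def pvIsqrtLoop (n : Int) : Nat → Int → Int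
  | 0, h => h
  | fuel+1, h => if (h + 1) * (h + 1) ≤ n then pvIsqrtLoop n fuel (h + 1) else h

def pvIsqrt (n : Int) : Int := pvIsqrtLoop n n.toNat 0

def make_circle_icon_alt (size : Int) (bg_r : Int) (bg_g : Int) (bg_b : Int) (fg_r : Int) (fg_g : Int) (fg_b : Int) : List (Int × Int × Int) :=
  let c := PySem.Int.floordiv size 2
  let r := PySem.Int.floordiv size 2 - 1
  let r2 := r * r
  let bg := (bg_r, bg_g, bg_b)
  let fg := (fg_r, fg_g, fg_b)
  (PySem.List.pyRange 0 size 1).foldl (fun pixels y =>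
    let k := r2 - (y - c) * (y - c)
    if k < 0 then
      pixels ++ PySem.List.pyRepeat [bg] size
    else
      let half := pvIsqrt k
      let lo := max (c - half) 0
      let hi := min (c + half) (size - 1)
      pixels ++ (PySem.List.pyRepeat [bg] lo ++ PySem.List.pyRepeat [fg] (hi - lo + 1) ++ PySem.List.pyRepeat [bg] (size - 1 - hi))) []

-- ===== PRECONDITION & SPEC =====
def Spec_make_circle_icon (size : Int) (bg_r : Int) (bg_g : Int) (bg_b : Int) (fg_r : Int) (fg_g : Int) (fg_b : Int) (out : List (Int × Int × Int)) : Prop := out = make_circle_icon_alt size bg_r bg_g bg_b fg_r fg_g fg_b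
instance (size : Int) (bg_r : Int) (bg_g : Int) (bg_b : Int) (fg_r : Int) (fg_g : Int) (fg_b : Int) (out : List (Int × Int × Int)) : Decidable (Spec_make_circle_icon size bg_r bg_g bg_b fg_r fg_g fg_b out) := by unfold Spec_make_circle_icon; infer_instance

-- ===== CLAIM (what is proved, stated in full; the proofs are below) =====
def Claim_equal_make_circle_icon : Prop := ∀ (size : Int) (bg_r : Int) (bg_g : Int) (bg_b : Int) (fg_r : Int) (fg_g : Int) (fg_b : Int), Dom_make_circle_icon size bg_r bg_g bg_b fg_r fg_g fg_b → Spec_make_circle_icon size bg_r bg_g bg_b fg_r fg_g fg_b (make_circle_icon size bg_r bg_g bg_b fg_r fg_g fg_b)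

-- ===== LEMMAS AND PROOFS =====

lemma pvIsqrtLoop_eq (n : Int) : ∀ (fuel : Nat) (h : Int), 0 ≤ h → h * h ≤ n →
    pvIsqrtLoop n fuel h = min ((Nat.sqrt n.toNat : Int)) (h + fuel) := by
  intro fuel
  induction fuel with
  | zero =>
    intro h h0 hsq
    have hm : h.toNat * h.toNat ≤ n.toNat := by
      have : (h.toNat * h.toNat : Int) ≤ n := by
        push_cast [Int.toNat_of_nonneg h0]; exact hsq
      omega
    have := Nat.le_sqrt.mpr hm
    simp [pvIsqrtLoop]
    omega
  | succ fuel ih =>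
    intro h h0 hsq
    by_cases hc : (h + 1) * (h + 1) ≤ n
    · rw [pvIsqrtLoop, if_pos hc, ih (h+1) (by omega) hc]
      congr 1
      push_cast
      ring
    · rw [pvIsqrtLoop, if_neg hc]
      have hn0 : 0 ≤ n := le_trans (mul_self_nonneg h) hsq
      have hA : ((h.toNat : Int)) = h := Int.toNat_of_nonneg h0
      have hB : ((n.toNat : Int)) = n := Int.toNat_of_nonneg hn0
      have hlt : n.toNat < (h.toNat + 1) * (h.toNat + 1) := by
        have hi : ((n.toNat : Int)) < ((h.toNat : Int) + 1) * ((h.toNat : Int) + 1) := by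
          rw [hA, hB]; linarith [lt_of_not_ge hc]
        exact_mod_cast hi
      have h1 : Nat.sqrt n.toNat < h.toNat + 1 := by
        by_contra hcon
        have := Nat.le_sqrt.mp (le_of_not_gt hcon)
        omega
      have hm : h.toNat * h.toNat ≤ n.toNat := by
        have : (h.toNat * h.toNat : Int) ≤ n := by
          push_cast [Int.toNat_of_nonneg h0]; exact hsq
        omega
      have := Nat.le_sqrt.mpr hm
      omega

lemma pvIsqrt_eq (n : Int) (hn : 0 ≤ n) : pvIsqrt n = (Nat.sqrt n.toNat : Int) := by
  rw [pvIsqrt, pvIsqrtLoop_eq n n.toNat 0 le_rfl (by omega)]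
  have := Nat.sqrt_le_self n.toNat
  omega

lemma pvIsqrt_nonneg (n : Int) (hn : 0 ≤ n) : 0 ≤ pvIsqrt n := by
  rw [pvIsqrt_eq n hn]; positivity

-- d·d ≤ k  ↔  -isqrt k ≤ d ≤ isqrt k, for k ≥ 0
lemma sq_le_iff_isqrt (k d : Int) (hk : 0 ≤ k) :
    d * d ≤ k ↔ -(pvIsqrt k) ≤ d ∧ d ≤ pvIsqrt k := by
  rw [pvIsqrt_eq k hk]
  have habs : ((d.natAbs * d.natAbs : Nat) : Int) = d * d := Int.natAbs_mul_self
  constructor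
  · intro h
    have hm : d.natAbs * d.natAbs ≤ k.toNat := by omega
    have := Nat.le_sqrt.mpr hm
    omega
  · intro h
    obtain ⟨h1, h2⟩ := h
    have hm : d.natAbs ≤ Nat.sqrt k.toNat := by omega
    have hsq : d.natAbs * d.natAbs ≤ k.toNat := Nat.le_sqrt.mp hm
    omega

-- A's pixel test, rewritten to the row form B uses
lemma cond_iff (x y c r : Int) :
    ((x - c) ^ 2 + (y - c) ^ 2 ≤ r ^ 2) ↔ (x - c) * (x - c) ≤ r * r - (y - c) * (y - c) := by
  rw [pow_two, pow_two, pow_two]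
  constructor <;> intro h <;> linarith

-- '[v] appended per element under an if' is a map
lemma foldl_ite_append {α β : Type} (l : List β) (p : β → Prop) [DecidablePred p]
    (fgv bgv : α) (acc : List α) :
    l.foldl (fun out x => if p x then out ++ [fgv] else out ++ [bgv]) acc
      = acc ++ l.map (fun x => if p x then fgv else bgv) := by
  have hfun : (fun (out : List α) x => if p x then out ++ [fgv] else out ++ [bgv])
      = fun out x => out ++ [if p x then fgv else bgv] := by
    funext out x
    by_cases h : p x <;> simp [h]
  rw [hfun, PySem.List.foldl_append_singleton_eq_map]

-- mapping an interval indicator over a range is three replicate blocks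
lemma map_range_split {α : Type} (n a b : Nat) (hab : a ≤ b) (hbn : b ≤ n)
    (g : Nat → α) (bgv fgv : α)
    (h1 : ∀ i, i < a → g i = bgv)
    (h2 : ∀ i, a ≤ i → i < b → g i = fgv)
    (h3 : ∀ i, b ≤ i → i < n → g i = bgv) :
    (List.range n).map g =
      List.replicate a bgv ++ List.replicate (b - a) fgv ++ List.replicate (n - b) bgv := by
  apply List.ext_getElem
  · simp; omega
  · intro i hi hi2
    simp only [List.length_map, List.length_range] at hi
    simp only [List.getElem_map, List.getElem_range, List.getElem_append,
      List.length_append, List.length_replicate, List.getElem_replicate]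
    split_ifs <;>
      first
        | exact h1 i (by omega)
        | exact h2 i (by omega) (by omega)
        | exact h3 i (by omega) (by omega)

-- one row of the picture: per-pixel map equals B's three-block row
lemma row_eq (size y c k s lo hi : Int) (bgv fgv : Int × Int × Int)
    (hy0 : 0 ≤ y) (hy1 : y < size) (hc0 : 0 ≤ c) (hc1 : c ≤ size - 1)
    (hk : k = (c - 1) * (c - 1) - (y - c) * (y - c))
    (hs : s = pvIsqrt k) (hlo : lo = max (c - s) 0) (hhi : hi = min (c + s) (size - 1)) :
    (PySem.List.pyRange 0 size 1).map
        (fun x => if (x - c) ^ 2 + (y - c) ^ 2 ≤ (c - 1) ^ 2 then fgv else bgv)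
      = if k < 0 then PySem.List.pyRepeat [bgv] size
        else PySem.List.pyRepeat [bgv] lo ++ PySem.List.pyRepeat [fgv] (hi - lo + 1)
              ++ PySem.List.pyRepeat [bgv] (size - 1 - hi) := by
  rw [PySem.List.pyRange_one]
  simp only [Int.sub_zero, zero_add, List.map_map]
  show (List.range size.toNat).map
      (fun i : Nat => if ((i : Int) - c) ^ 2 + (y - c) ^ 2 ≤ (c - 1) ^ 2 then fgv else bgv) = _
  by_cases hkneg : k < 0
  · rw [if_pos hkneg, PySem.List.pyRepeat_singleton]
    rw [List.eq_replicate_iff]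
    refine ⟨by simp, ?_⟩
    intro v hv
    simp only [List.mem_map, List.mem_range] at hv
    obtain ⟨i, hilt, rfl⟩ := hv
    rw [if_neg]
    rw [cond_iff]
    have := mul_self_nonneg ((i : Int) - c)
    omega
  · rw [if_neg hkneg]
    have hk0 : 0 ≤ k := by omega
    have hs0 : 0 ≤ s := hs ▸ pvIsqrt_nonneg k hk0
    have hiff : ∀ x : Int,
        ((x - c) ^ 2 + (y - c) ^ 2 ≤ (c - 1) ^ 2 ↔ c - s ≤ x ∧ x ≤ c + s) := by
      intro x
      rw [cond_iff x y c (c - 1), ← hk, sq_le_iff_isqrt k (x - c) hk0, ← hs]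
      constructor <;> intro hx <;> constructor <;> omega
    have hlo1 : c - s ≤ lo := hlo ▸ le_max_left _ _
    have hlo2 : 0 ≤ lo := hlo ▸ le_max_right _ _
    have hlo3 : lo = c - s ∨ lo = 0 := hlo ▸ max_choice _ _
    have hhi1 : hi ≤ c + s := hhi ▸ min_le_left _ _
    have hhi2 : hi ≤ size - 1 := hhi ▸ min_le_right _ _
    have hhi3 : hi = c + s ∨ hi = size - 1 := hhi ▸ min_choice _ _
    have hloc : lo ≤ c := by omega
    have hchi : c ≤ hi := by rcases hhi3 with h | h <;> omega
    simp only [PySem.List.pyRepeat_singleton]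
    have e1 : (hi - lo + 1).toNat = (hi + 1).toNat - lo.toNat := by omega
    have e2 : (size - 1 - hi).toNat = size.toNat - (hi + 1).toNat := by omega
    rw [e1, e2]
    apply map_range_split size.toNat lo.toNat (hi + 1).toNat (by omega) (by omega)
    · intro i hilt
      rw [if_neg]
      rw [hiff]
      rcases hlo3 with h | h <;> omega
    · intro i hge hilt
      rw [if_pos]
      rw [hiff]
      constructor <;> omega
    · intro i hge hilt
      rw [if_neg]
      rw [hiff]
      rcases hhi3 with h | h <;> omega

-- ===== VERDICT (by name: the statement is the Claim_ definition above) =====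
theorem make_circle_icon_spec : Claim_equal_make_circle_icon := by
  intro size bg_r bg_g bg_b fg_r fg_g fg_b _
  unfold Spec_make_circle_icon make_circle_icon make_circle_icon_alt
  dsimp only
  rw [PySem.Int.floordiv_eq_ediv_of_pos (b := 2) (by norm_num)]
  apply PySem.List.foldl_congr_mem
  intro acc y hy
  rw [PySem.List.mem_pyRange_one] at hy
  have hc0 : 0 ≤ size / 2 := by omega
  have hc1 : size / 2 ≤ size - 1 := by omega
  rw [foldl_ite_append]
  rw [← apply_ite (fun l : List (Int × Int × Int) => acc ++ l)]
  congr 1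
  exact row_eq size y (size / 2) _ _ _ _ (bg_r, bg_g, bg_b) (fg_r, fg_g, fg_b)
    hy.1 hy.2 hc0 hc1 rfl rfl rfl rfl
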